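-- pv_equiv track=rewrite | github.com/ksw0733/BOJ_Programmers | 백준/Gold/2133. 타일 채우기/타일 채우기.py | dp
-- ===== SOURCE A (Python) =====
-- def dp(N):
--     dp = [0] * 31
--     dp[2] = 3
--     for i in range(4, N + 1):
--         if i % 2 == 1:
--             continue
--         else:
--             dp[i] = dp[i - 2] * 3 + sum(dp[:i - 2]) * 2 + 2
--
--     return dp[N]
-- ===== SOURCE B (Python) =====
-- def dp(N):
--     if N < 2 or N % 2 == 1:
--         return 0
--     prev, cur = 1, 3
--     for _ in range((N - 2) // 2):
--         prev, cur = cur, 4 * cur - prev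
--     return cur
-- ===== Notes on version B (the rewrite author's own statement) =====
-- stated objective: alternative
-- what changed: Replaced the fixed-size table with nested sum(dp[:i-2]) re-scans by the standard two-variable linear recurrence dp[n] = 4*dp[n-2] - dp[n-4] (prev/cur pair, no list, no inner pass).
-- intended difference: At N = -29 A returns 3 because Python's negative-index wraparound reads dp[-29] = dp[2]; B returns 0, the intended count for a negative board length. — e.g. on dp(-29): A returns 3, B returns 0
import Mathlib
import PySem

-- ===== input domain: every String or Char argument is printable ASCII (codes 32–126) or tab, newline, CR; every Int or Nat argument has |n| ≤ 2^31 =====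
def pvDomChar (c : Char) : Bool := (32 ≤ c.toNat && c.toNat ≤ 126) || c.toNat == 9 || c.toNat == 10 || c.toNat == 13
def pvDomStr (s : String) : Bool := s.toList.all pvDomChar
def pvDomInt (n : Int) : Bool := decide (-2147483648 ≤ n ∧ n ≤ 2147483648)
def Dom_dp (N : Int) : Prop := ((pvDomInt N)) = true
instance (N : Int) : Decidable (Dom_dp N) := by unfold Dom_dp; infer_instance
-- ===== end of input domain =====

-- B drops A's 31-slot table and its inner sum(dp[:i-2]) re-scan, using the two-variable
-- recurrence dp[n] = 4*dp[n-2] - dp[n-4] instead (alternative decomposition; return value only).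

-- ===== PORT A =====
def dp (N : Int) : Int :=
  let d0 : List Int := (List.replicate 31 (0 : Int)).set 2 3
  let d := (PySem.List.pyRange 4 (N + 1) 1).foldl (fun d i =>
    if PySem.Int.mod i 2 == 1 then d
    else d.set i.toNat
      ((PySem.List.pyGet? d (i - 2)).getD 0 * 3
        + (PySem.List.slice d none (some (i - 2))).sum * 2 + 2)) d0
  (PySem.List.pyGet? d N).getD 0

-- ===== PORT B =====
def dpAltGo : Nat → Int → Int → Int
  | 0, _, cur => cur
  | k + 1, prev, cur => dpAltGo k cur (4 * cur - prev)

def dp_alt (N : Int) : Int :=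
  if N < 2 ∨ PySem.Int.mod N 2 == 1 then 0
  else dpAltGo ((N - 2) / 2).toNat 1 3

-- ===== PRECONDITION & SPEC =====
-- A raises IndexError for N > 30 (writing dp[31]) and for N < -31 (return dp[N]); Pre_ excludes exactly those.
def Pre_dp (N : Int) : Prop := -31 ≤ N ∧ N ≤ 30
instance (N : Int) : Decidable (Pre_dp N) := by unfold Pre_dp; infer_instance
def pvWitness_dp : Int := 12

-- At N = -29 A returns 3 because Python's negative-index wraparound reads dp[-29] = dp[2];
-- B returns 0, the intended count for a negative board length.
def D_dp (N : Int) : Prop := N = -29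
instance (N : Int) : Decidable (D_dp N) := by unfold D_dp; infer_instance
def Spec_dp (N : Int) (out : Int) : Prop := ¬ D_dp N → out = dp_alt N
instance (N : Int) (out : Int) : Decidable (Spec_dp N out) := by unfold Spec_dp; infer_instance
def pvDiffWitness_dp : Int := -29
def pvDiffWitnessOut_dp : Int × Int := (3, 0)

-- ===== CLAIM (what is proved, stated in full; the proofs are below) =====
def Claim_unchanged_dp : Prop := ∀ (N : Int), Dom_dp N → Pre_dp N → Spec_dp N (dp N)
def Claim_changed_dp : Prop := Dom_dp (pvDiffWitness_dp) ∧ Pre_dp (pvDiffWitness_dp) ∧ D_dp (pvDiffWitness_dp) ∧ dp (pvDiffWitness_dp) = pvDiffWitnessOut_dp.1 ∧ dp_alt (pvDiffWitness_dp) = pvDiffWitnessOut_dp.2 ∧ pvDiffWitnessOut_dp.1 ≠ pvDiffWitnessOut_dp.2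
def Claim_exact_dp : Prop := ∀ (N : Int), Dom_dp N → Pre_dp N → D_dp N → dp N ≠ dp_alt N

-- ===== LEMMAS AND PROOFS =====

theorem pv_all62 :
    ((List.range 62).all (fun k =>
      ((k : Int) - 31 == -29) || dp ((k : Int) - 31) == dp_alt ((k : Int) - 31))) = true := by
  decide

-- ===== VERDICT (by name: the statement is the Claim_ definition above) =====
theorem dp_spec : Claim_unchanged_dp := by
  unfold Claim_unchanged_dp
  intro N _ hpre
  unfold Pre_dp at hpre
  unfold Spec_dp
  intro hnd
  unfold D_dp at hnd
  have h := pv_all62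
  rw [List.all_eq_true] at h
  have hk : (N + 31).toNat ∈ List.range 62 := by rw [List.mem_range]; omega
  have hb := h _ hk
  have heq : (((N + 31).toNat : Int)) - 31 = N := by omega
  rw [heq] at hb
  rcases Bool.or_eq_true_iff.mp hb with h1 | h2
  · exact absurd (eq_of_beq h1) hnd
  · exact eq_of_beq h2

theorem dp_changed : Claim_changed_dp := by unfold Claim_changed_dp; decide

theorem dp_tight : Claim_exact_dp := by
  unfold Claim_exact_dp
  intro N _ _ hd
  unfold D_dp at hd
  subst hd
  decide
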